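-- pv_equiv track=rewrite | github.com/OmaDev2/tube2_new | utils/video_processing.py | _distribute_effects_per_clip
-- ===== SOURCE A (Python) =====
-- from typing import Dict, List, Optional
--
-- def _distribute_effects_per_clip(effects_ui: List[tuple], num_clips: int) -> List[Optional[List[tuple]]]:
--     """
--     Distribuye los efectos seleccionados entre los clips disponibles.
--
--     Por ejemplo, si tienes efectos [zoom_in, zoom_out] y 4 clips:
--     - Clip 1: zoom_in
--     - Clip 2: zoom_out
--     - Clip 3: zoom_in
--     - Clip 4: zoom_out
--     """
--     if not effects_ui or num_clips <= 0:
--         return None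
--
--     effects_per_clip = []
--
--     for i in range(num_clips):
--         if effects_ui:
--             # Ciclar entre los efectos disponibles
--             effect_index = i % len(effects_ui)
--             selected_effect = effects_ui[effect_index]
--
--             # Cada clip tendrá una lista con un solo efecto
--             effects_per_clip.append([selected_effect])
--         else:
--             effects_per_clip.append(None)
--
--     return effects_per_clip
-- ===== SOURCE B (Python) =====
-- def _distribute_effects_per_clip(effects_ui, num_clips):
--     if not effects_ui or num_clips <= 0:
--         return None
--     base = (effects_ui * (num_clips // len(effects_ui) + 1))[:num_clips]
--     return [[e] for e in base]
-- ===== Notes on version B (the rewrite author's own statement) =====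
-- stated objective: alternative
-- what changed: Replaces the per-clip loop with a modulo index by materializing the repeated effect list once (list multiplication), slicing it to num_clips, and mapping each effect to a singleton list.
import Mathlib
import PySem

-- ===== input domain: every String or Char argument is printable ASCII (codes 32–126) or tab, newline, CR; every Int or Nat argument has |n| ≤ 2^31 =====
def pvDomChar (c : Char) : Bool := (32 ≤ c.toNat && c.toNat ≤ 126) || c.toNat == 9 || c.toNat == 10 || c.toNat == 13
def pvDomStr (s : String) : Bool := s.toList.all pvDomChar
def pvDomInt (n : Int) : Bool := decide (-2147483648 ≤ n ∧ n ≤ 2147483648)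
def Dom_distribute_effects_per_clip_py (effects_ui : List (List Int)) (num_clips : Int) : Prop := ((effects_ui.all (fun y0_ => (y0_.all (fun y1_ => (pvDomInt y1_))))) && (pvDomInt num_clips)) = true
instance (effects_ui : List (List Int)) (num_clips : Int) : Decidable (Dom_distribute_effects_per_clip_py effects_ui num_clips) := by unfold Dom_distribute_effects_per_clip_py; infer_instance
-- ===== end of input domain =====

-- B builds the cyclic effect sequence once (replicate + take) instead of A's per-index modulo loop; same cost, different decomposition.


-- ===== PORT A =====
-- literal port of A: guard, then a loop over range(num_clips) appending [effects_ui[i % len]].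
-- The Python 'else: effects_per_clip.append(None)' branch is unreachable (the guard ensures effects_ui ≠ []
-- and effects_ui is never modified); it is kept as the 'else []' arm below (None is not a value of the
-- element type). pyGet? never returns none here (0 ≤ i % len < len), so .getD [] is exact.
def distribute_effects_per_clip_py (effects_ui : List (List Int)) (num_clips : Int) : Option (List (List (List Int))) :=
  if effects_ui = [] ∨ num_clips ≤ 0 then none
  else
    some ((PySem.List.pyRange 0 num_clips 1).foldl
      (fun acc i =>
        if effects_ui ≠ [] then
          acc ++ [[(PySem.List.pyGet? effects_ui (PySem.Int.mod i (effects_ui.length : Int))).getD []]]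
        else acc ++ [[]]) [])

-- ===== PORT B =====
-- literal port of B: base = (effects_ui * (num_clips // len + 1))[:num_clips]; [[e] for e in base]
def distribute_effects_per_clip_py_alt (effects_ui : List (List Int)) (num_clips : Int) : Option (List (List (List Int))) :=
  if effects_ui = [] ∨ num_clips ≤ 0 then none
  else
    let base := PySem.List.slice
      (List.flatten (List.replicate (PySem.Int.floordiv num_clips (effects_ui.length : Int) + 1).toNat effects_ui))
      none (some num_clips)
    some (base.map (fun e => [e]))

-- ===== PRECONDITION & SPEC =====
def Spec_distribute_effects_per_clip_py (effects_ui : List (List Int)) (num_clips : Int) (out : Option (List (List (List Int)))) : Prop := out = distribute_effects_per_clip_py_alt effects_ui num_clips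
instance (effects_ui : List (List Int)) (num_clips : Int) (out : Option (List (List (List Int)))) : Decidable (Spec_distribute_effects_per_clip_py effects_ui num_clips out) := by unfold Spec_distribute_effects_per_clip_py; infer_instance

-- ===== CLAIM (what is proved, stated in full; the proofs are below) =====
def Claim_equal_distribute_effects_per_clip_py : Prop := ∀ (effects_ui : List (List Int)) (num_clips : Int), Dom_distribute_effects_per_clip_py effects_ui num_clips → Spec_distribute_effects_per_clip_py effects_ui num_clips (distribute_effects_per_clip_py effects_ui num_clips)

-- ===== LEMMAS AND PROOFS =====

-- element i of the k-fold repetition of L is L[i % L.length]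
theorem getElem_flatten_replicate {α : Type} (L : List α) (k i : Nat)
    (hL : L ≠ []) (hi : i < k * L.length)
    (h : i < (List.flatten (List.replicate k L)).length) :
    (List.flatten (List.replicate k L))[i] = L[i % L.length]'(Nat.mod_lt i (List.length_pos_iff.mpr hL)) := by
  induction k generalizing i with
  | zero => omega
  | succ k ih =>
    simp only [List.replicate_succ, List.flatten_cons]
    by_cases hlt : i < L.length
    · rw [List.getElem_append_left hlt]
      congr 1
      exact (Nat.mod_eq_of_lt hlt).symm
    · have hlen : L.length ≤ i := by omega
      have hfl : (List.flatten (List.replicate k L)).length = k * L.length := by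
        simp
      have hsm : (k + 1) * L.length = k * L.length + L.length := Nat.succ_mul k L.length
      rw [List.getElem_append_right hlen]
      have := ih (i - L.length) (by omega) (by omega)
      rw [this]
      congr 1
      rw [Nat.mod_eq_sub_mod hlen]

theorem distribute_effects_per_clip_py_spec : Claim_equal_distribute_effects_per_clip_py := by
  intro effects_ui num_clips _
  unfold Spec_distribute_effects_per_clip_py distribute_effects_per_clip_py distribute_effects_per_clip_py_alt
  by_cases hg : effects_ui = [] ∨ num_clips ≤ 0
  · simp [hg]
  · push Not at hg
    obtain ⟨hne, hpos⟩ := hg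
    rw [if_neg (by push Not; exact ⟨hne, hpos⟩), if_neg (by push Not; exact ⟨hne, hpos⟩)]
    have hlen : 0 < effects_ui.length := List.length_pos_iff.mpr hne
    set L := effects_ui with hLdef
    set m : Nat := num_clips.toNat with hm
    have hmn : (m : Int) = num_clips := Int.toNat_of_nonneg (le_of_lt hpos)
    set k : Nat := (PySem.Int.floordiv num_clips (L.length : Int) + 1).toNat with hk
    have hkval : (k : Int) = num_clips / (L.length : Int) + 1 := by
      rw [hk, PySem.Int.floordiv_eq_ediv_of_pos (by exact_mod_cast hlen)]
      have : (0:Int) ≤ num_clips / (L.length : Int) + 1 := by positivity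
      exact Int.toNat_of_nonneg this
    have h2 : (m : Int) ≤ (k : Int) * (L.length : Int) := by
      have h1 : num_clips < ((num_clips / (L.length : Int)) + 1) * (L.length : Int) :=
        Int.lt_ediv_add_one_mul_self num_clips (by exact_mod_cast hlen)
      rw [hmn, hkval]; omega
    have hmk : m ≤ k * L.length := by exact_mod_cast h2
    -- A side: the foldl is a map over pyRange
    have hA : (PySem.List.pyRange 0 num_clips 1).foldl
        (fun acc i =>
          if L ≠ [] then
            acc ++ [[(PySem.List.pyGet? L (PySem.Int.mod i (L.length : Int))).getD []]]
          else acc ++ [[]]) []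
        = (List.range m).map (fun i => [L[i % L.length]'(Nat.mod_lt i hlen)]) := by
      simp only [if_pos hne]
      rw [← hmn, PySem.List.pyRange_zero_natCast, List.foldl_map,
        PySem.List.foldl_append_singleton_eq_map, List.nil_append]
      apply List.map_congr_left
      intro i hi
      have hmod : PySem.Int.mod (i : Int) ((L.length : Nat) : Int) = ((i % L.length : Nat) : Int) :=
        PySem.Int.mod_natCast i L.length
      rw [hmod, PySem.List.pyGet?_natCast]
      simp [List.getElem?_eq_getElem (Nat.mod_lt i hlen)]
    -- B side: slice is take, and take of flatten-replicate is the same map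
    have hB : PySem.List.slice (List.flatten (List.replicate k L)) none (some num_clips)
        = (List.range m).map (fun i => L[i % L.length]'(Nat.mod_lt i hlen)) := by
      rw [PySem.List.slice_to _ (le_of_lt hpos)]
      have hflatlen : (List.flatten (List.replicate k L)).length = k * L.length := by
        simp [Nat.mul_comm]
      apply List.ext_getElem
      · simp only [List.length_take, hflatlen, List.length_map, List.length_range]
        omega
      · intro i h1 h2'
        have him : i < m := by
          simp only [List.length_take, hflatlen] at h1; omega
        rw [List.getElem_take, getElem_flatten_replicate L k i hne (by omega)]
        simp
    rw [hA, hB]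
    simp [List.map_map, Function.comp]
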